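-- pv_equiv track=rewrite | github.com/waroad/Auto_refactoring-differential_testing | updated/fail/2606.py | maximumCostSubstring
-- ===== SOURCE A (Python) =====
-- def maximumCostSubstring(s: str, chars: str, vals: list[int]) -> int:
--     ((nums, c), c) = (([], {}), {item: i for (i, item) in enumerate(chars)})
--     for i in s:
--         if i in c:
--             nums.append(vals[c[i]])
--         else:
--             nums.append(ord(i) - ord('a') + 1)
--     (res, total) = (0, 0)
--     for i in nums:
--         total += i
--         res = max(res, total)
--         if total < 0:
--             total = 0
--     return res
-- ===== SOURCE B (Python) =====
-- def maximumCostSubstring(s: str, chars: str, vals: list[int]) -> int: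
--     idx = {}
--     for i, ch in enumerate(chars):
--         idx[ch] = i
--     res = 0
--     total = 0
--     min_prefix = 0
--     for ch in s:
--         j = idx.get(ch)
--         total += vals[j] if j is not None else ord(ch) - ord('a') + 1
--         if total - min_prefix > res:
--             res = total - min_prefix
--         if total < min_prefix:
--             min_prefix = total
--     return res
-- ===== Notes on version B (the rewrite author's own statement) =====
-- stated objective: alternative
-- what changed: Replaces A's two-pass Kadane (build a nums list, then scan with a resetting accumulator) by a single fused pass that tracks the running prefix sum and the minimum prefix seen, taking res = max(res, total - min_prefix); no intermediate list is built.
import Mathlib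
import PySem

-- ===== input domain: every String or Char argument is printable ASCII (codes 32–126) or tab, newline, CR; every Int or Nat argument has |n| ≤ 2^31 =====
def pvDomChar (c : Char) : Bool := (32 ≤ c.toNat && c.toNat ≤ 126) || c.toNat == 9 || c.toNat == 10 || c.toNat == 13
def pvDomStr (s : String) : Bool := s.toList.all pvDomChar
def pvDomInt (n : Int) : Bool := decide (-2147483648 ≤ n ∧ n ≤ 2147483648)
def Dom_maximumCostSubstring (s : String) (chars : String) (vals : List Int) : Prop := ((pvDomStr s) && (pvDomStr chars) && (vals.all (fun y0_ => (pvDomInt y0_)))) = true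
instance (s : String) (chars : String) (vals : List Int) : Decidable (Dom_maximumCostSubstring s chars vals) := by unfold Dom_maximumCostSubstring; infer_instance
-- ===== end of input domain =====

-- B fuses the mapping and the scan into one pass and uses the prefix-sum / minimum-prefix
-- formulation instead of A's Kadane resetting accumulator (objective: alternative).

-- ===== PORT A =====
-- {item: i for (i, item) in enumerate(chars)} — identical comprehension in both Pythons
def pvBuildIdx (chars : String) : PySem.Dict Char Int :=
  (PySem.List.enumerate chars.toList 0).foldl (fun d p => d.insert p.2 p.1) PySem.Dict.empty

def maximumCostSubstring (s : String) (chars : String) (vals : List Int) : Int :=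
  let c := pvBuildIdx chars
  let nums := s.toList.foldl (fun nums i =>
    match c.get? i with
    | some j => nums ++ [PySem.List.pyGetD vals j 0]   -- vals[c[i]]; in range under Pre_
    | none   => nums ++ [(i.toNat : Int) - 97 + 1]) []
  let r := nums.foldl (fun (p : Int × Int) i =>
    let total := p.2 + i
    let res := max p.1 total
    (res, if total < 0 then 0 else total)) (0, 0)
  r.1

-- ===== PORT B =====
def maximumCostSubstring_alt (s : String) (chars : String) (vals : List Int) : Int :=
  let idx := pvBuildIdx chars
  let st := s.toList.foldl (fun (st : Int × Int × Int) ch =>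
    let v := match idx.get? ch with
      | some j => PySem.List.pyGetD vals j 0           -- vals[j]; in range under Pre_
      | none   => (ch.toNat : Int) - 97 + 1
    let total := st.2.1 + v
    let res := if total - st.2.2 > st.1 then total - st.2.2 else st.1
    let minp := if total < st.2.2 then total else st.2.2
    (res, total, minp)) (0, 0, 0)
  st.1

-- ===== PRECONDITION & SPEC =====
-- Pre_ excludes exactly the inputs on which both Pythons raise IndexError: some character of s
-- occurs in chars but its last index in chars is ≥ len(vals).
def Pre_maximumCostSubstring (s : String) (chars : String) (vals : List Int) : Prop :=
  (s.toList.all (fun ch =>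
    !chars.toList.contains ch ||
      decide (chars.toList.length - 1 - chars.toList.reverse.idxOf ch < vals.length))) = true
instance (s : String) (chars : String) (vals : List Int) : Decidable (Pre_maximumCostSubstring s chars vals) := by unfold Pre_maximumCostSubstring; infer_instance

def pvWitness_maximumCostSubstring : String × String × List Int := ("abcd", "ab", [5, -3])

def Spec_maximumCostSubstring (s : String) (chars : String) (vals : List Int) (out : Int) : Prop := out = maximumCostSubstring_alt s chars vals
instance (s : String) (chars : String) (vals : List Int) (out : Int) : Decidable (Spec_maximumCostSubstring s chars vals out) := by unfold Spec_maximumCostSubstring; infer_instance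

-- ===== CLAIM (what is proved, stated in full; the proofs are below) =====
def Claim_equal_maximumCostSubstring : Prop := ∀ (s : String) (chars : String) (vals : List Int), Dom_maximumCostSubstring s chars vals → Pre_maximumCostSubstring s chars vals → Spec_maximumCostSubstring s chars vals (maximumCostSubstring s chars vals)

-- ===== LEMMAS AND PROOFS =====

-- the common per-character value
def pvVal (c : PySem.Dict Char Int) (vals : List Int) (ch : Char) : Int :=
  match c.get? ch with
  | some j => PySem.List.pyGetD vals j 0
  | none   => (ch.toNat : Int) - 97 + 1

lemma nums_eq_map (c : PySem.Dict Char Int) (vals : List Int) (l : List Char) :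
    l.foldl (fun nums i =>
      match c.get? i with
      | some j => nums ++ [PySem.List.pyGetD vals j 0]
      | none   => nums ++ [(i.toNat : Int) - 97 + 1]) []
    = l.map (pvVal c vals) := by
  have h : (fun (nums : List Int) i =>
      match c.get? i with
      | some j => nums ++ [PySem.List.pyGetD vals j 0]
      | none   => nums ++ [(i.toNat : Int) - 97 + 1])
      = fun nums i => nums ++ [pvVal c vals i] := by
    funext nums i
    unfold pvVal
    cases c.get? i <;> rfl
  rw [h, PySem.List.foldl_append_singleton_eq_map]
  simp

-- Kadane over a list of values equals the prefix-sum / minimum-prefix scan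
lemma kadane_eq_prefix (l : List Int) (resA totA resB totB minp : Int)
    (hres : resA = resB) (htot : totA = totB - minp) :
    (l.foldl (fun (p : Int × Int) i =>
      let total := p.2 + i
      let res := max p.1 total
      (res, if total < 0 then 0 else total)) (resA, totA)).1
    = (l.foldl (fun (st : Int × Int × Int) v =>
      let total := st.2.1 + v
      let res := if total - st.2.2 > st.1 then total - st.2.2 else st.1
      let minp := if total < st.2.2 then total else st.2.2
      (res, total, minp)) (resB, totB, minp)).1 := by
  induction l generalizing resA totA resB totB minp with
  | nil => simpa using hres
  | cons x xs ih =>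
    simp only [List.foldl_cons]
    apply ih
    · simp only [max_def]
      split_ifs <;> omega
    · split_ifs <;> omega

theorem equal_all (s : String) (chars : String) (vals : List Int) :
    maximumCostSubstring s chars vals = maximumCostSubstring_alt s chars vals := by
  unfold maximumCostSubstring maximumCostSubstring_alt
  dsimp only
  rw [nums_eq_map]
  have hg : (fun (st : Int × Int × Int) ch =>
      let v := match (pvBuildIdx chars).get? ch with
        | some j => PySem.List.pyGetD vals j 0
        | none   => (ch.toNat : Int) - 97 + 1
      let total := st.2.1 + v
      let res := if total - st.2.2 > st.1 then total - st.2.2 else st.1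
      let minp := if total < st.2.2 then total else st.2.2
      (res, total, minp))
      = fun (st : Int × Int × Int) ch =>
        (fun (st : Int × Int × Int) (v : Int) =>
          let total := st.2.1 + v
          let res := if total - st.2.2 > st.1 then total - st.2.2 else st.1
          let minp := if total < st.2.2 then total else st.2.2
          (res, total, minp)) st (pvVal (pvBuildIdx chars) vals ch) := by
    funext st ch
    unfold pvVal
    cases (pvBuildIdx chars).get? ch <;> rfl
  rw [hg]
  exact (kadane_eq_prefix (List.map (pvVal (pvBuildIdx chars) vals) s.toList)
      0 0 0 0 0 rfl rfl).trans (congrArg Prod.fst List.foldl_map)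

-- ===== VERDICT (by name: the statement is the Claim_ definition above) =====
theorem maximumCostSubstring_spec : Claim_equal_maximumCostSubstring := by
  intro s chars vals _ _
  exact equal_all s chars vals
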